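-- pv_equiv track=rewrite | github.com/hwwzrzr/APT-KGL | create_graph_v4.py | getsocketid
-- ===== SOURCE A (Python) =====
-- def getsocketid(dic,socketlist):
--     currentID = 4
--     socketid = {'sid':-1}
--     for index,filename in enumerate(socketlist):
--         if dic['path']['path'] == filename:
--             id = index
--             socketid['sid'] = id+currentID
--     return socketid
-- ===== SOURCE B (Python) =====
-- def getsocketid(dic, socketlist):
--     for i in range(len(socketlist) - 1, -1, -1):
--         if dic['path']['path'] == socketlist[i]:
--             return {'sid': i + 4}
--     return {'sid': -1}
-- ===== Notes on version B (the rewrite author's own statement) =====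
-- stated objective: simpler
-- what changed: A scans the whole list forward keeping the last matching index; B scans backward and returns immediately at the first match (the same last-matching index), keeping the dict lookup inside the loop so an empty list never dereferences dic.
-- outside the precondition, e.g. on getsocketid({}, ['x']): A raises KeyError, B raises KeyError
import Mathlib
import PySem

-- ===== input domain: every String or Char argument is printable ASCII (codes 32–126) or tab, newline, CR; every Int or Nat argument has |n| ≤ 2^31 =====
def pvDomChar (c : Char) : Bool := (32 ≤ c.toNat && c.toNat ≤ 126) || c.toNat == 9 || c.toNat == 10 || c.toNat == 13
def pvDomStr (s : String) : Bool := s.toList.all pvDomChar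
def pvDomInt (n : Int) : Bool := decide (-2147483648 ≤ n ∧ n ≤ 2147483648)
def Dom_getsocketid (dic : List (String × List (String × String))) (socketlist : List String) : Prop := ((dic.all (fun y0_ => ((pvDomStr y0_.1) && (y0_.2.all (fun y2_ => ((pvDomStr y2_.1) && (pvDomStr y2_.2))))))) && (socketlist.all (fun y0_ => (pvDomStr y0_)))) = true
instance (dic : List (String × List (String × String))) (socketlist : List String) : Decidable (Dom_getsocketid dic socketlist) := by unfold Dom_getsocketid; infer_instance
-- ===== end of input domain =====

-- B replaces A's keep-last forward scan by a backward scan that returns at the first match (simpler: early exit, no accumulator).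

-- ===== PORT A =====
-- A: forward scan over enumerate(socketlist), remembering the last index whose filename equals dic['path']['path'].
def getsocketid (dic : List (String × List (String × String))) (socketlist : List String) : List (String × Int) :=
  [("sid",
    (PySem.List.enumerate socketlist 0).foldl (fun sid p =>
      match ((PySem.Dict.mk dic).get? "path").bind (fun m => (PySem.Dict.mk m).get? "path") with
      | some path => if path == p.2 then p.1 + 4 else sid
      | none => sid)   -- none = KeyError in Python; excluded by Pre_ when the loop body runs
      (-1))]

-- ===== PORT B =====
-- B's loop: i from socketlist.length-1 down to 0 (fuel = i+1), return on first match.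
def getsocketidAltGo (dic : List (String × List (String × String))) (socketlist : List String) : Nat → List (String × Int)
  | 0 => [("sid", -1)]
  | i + 1 =>
    match ((PySem.Dict.mk dic).get? "path").bind (fun m => (PySem.Dict.mk m).get? "path") with
    | some path =>
        if path == socketlist.getD i "" then [("sid", (i : Int) + 4)]
        else getsocketidAltGo dic socketlist i
    | none => [("sid", -1)]   -- KeyError in Python; excluded by Pre_ when the loop body runs

def getsocketid_alt (dic : List (String × List (String × String))) (socketlist : List String) : List (String × Int) :=
  getsocketidAltGo dic socketlist socketlist.length

-- ===== PRECONDITION & SPEC =====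
-- Pre_ excludes exactly the inputs on which Python A raises KeyError: a nonempty socketlist with
-- dic['path']['path'] missing (both A and B raise there).
def Pre_getsocketid (dic : List (String × List (String × String))) (socketlist : List String) : Prop :=
  socketlist = [] ∨ (((PySem.Dict.mk dic).get? "path").bind (fun m => (PySem.Dict.mk m).get? "path")).isSome = true
instance (dic : List (String × List (String × String))) (socketlist : List String) : Decidable (Pre_getsocketid dic socketlist) := by unfold Pre_getsocketid; infer_instance

def pvWitness_getsocketid : (List (String × List (String × String))) × List String :=
  ([("path", [("path", "a.txt")])], ["a.txt", "b.txt"])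

def Spec_getsocketid (dic : List (String × List (String × String))) (socketlist : List String) (out : List (String × Int)) : Prop := out = getsocketid_alt dic socketlist
instance (dic : List (String × List (String × String))) (socketlist : List String) (out : List (String × Int)) : Decidable (Spec_getsocketid dic socketlist out) := by unfold Spec_getsocketid; infer_instance

-- ===== CLAIM (what is proved, stated in full; the proofs are below) =====
def Claim_equal_getsocketid : Prop := ∀ (dic : List (String × List (String × String))) (socketlist : List String), Dom_getsocketid dic socketlist → Pre_getsocketid dic socketlist → Spec_getsocketid dic socketlist (getsocketid dic socketlist)

-- ===== LEMMAS AND PROOFS =====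

-- B's countdown only reads indices < i, so appending to the list does not change it.
lemma altGo_append (dic : List (String × List (String × String))) (l : List String) (a : String) :
    ∀ i, i ≤ l.length → getsocketidAltGo dic (l ++ [a]) i = getsocketidAltGo dic l i := by
  intro i
  induction i with
  | zero => intro _; simp [getsocketidAltGo]
  | succ i ih =>
    intro h
    have hi : i < l.length := by omega
    simp only [getsocketidAltGo]
    rw [List.getD_append _ _ _ _ hi, ih (by omega)]

-- The two ports agree on every input (in the KeyError case both ports yield sid = -1).
lemma ports_agree (dic : List (String × List (String × String))) (socketlist : List String) :
    getsocketid dic socketlist = getsocketid_alt dic socketlist := by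
  induction socketlist using List.reverseRecOn with
  | nil => rfl
  | append_singleton l a ih =>
    unfold getsocketid getsocketid_alt at *
    rw [PySem.List.enumerate_append, List.foldl_append]
    simp only [PySem.List.enumerate_cons, PySem.List.enumerate_nil, List.foldl_cons, List.foldl_nil,
      List.length_append, List.length_singleton]
    cases hlook : ((PySem.Dict.mk dic).get? "path").bind (fun m => (PySem.Dict.mk m).get? "path") with
    | none =>
      simp only [hlook] at ih ⊢
      simp [getsocketidAltGo, hlook]
    | some path =>
      simp only [hlook] at ih ⊢
      show _ = getsocketidAltGo dic (l ++ [a]) (l.length + 1)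
      simp only [getsocketidAltGo, hlook]
      rw [List.getD_append_right _ _ _ _ (le_refl _)]
      simp only [Nat.sub_self, List.getD_cons_zero]
      by_cases hpa : (path == a) = true
      · simp [hpa]
      · rw [if_neg hpa, if_neg hpa, altGo_append dic l a l.length (le_refl _)]
        exact ih

-- ===== VERDICT (by name: the statement is the Claim_ definition above) =====
theorem getsocketid_spec : Claim_equal_getsocketid := by
  intro dic socketlist _ _
  exact ports_agree dic socketlist
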